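-- pv_equiv track=rewrite | github.com/mekta03/Anomaly_02_12 | result_anomaly.py | month_for_atlas_by_day
-- ===== SOURCE A (Python) =====
-- def name_of_month(month:int) -> str:
--     """
--     Возвращает название месяца согласно номеру
--     """
--     dct_month = {1: 'January', 2: 'February', 3: 'March', 4: 'April', 5: 'May', 6: 'June', 7: 'Jule', 8: 'August',
--                  9: 'September', 10: 'October', 11: 'November', 12: 'December'}
--
--     return dct_month[month]
--
-- def month_for_atlas_by_day(month:int, day:int)->dict:
--     """
--     Определяет нужные месяца для атласов в зависимости от выбранного дня текущего месяца, создает словарь '01':'January'\n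
--     month - месяц 01..12 \n
--     day - день месяца 01..31 \n
--     """
--
--     dct_month_atlas = {}
--     for d in day:
--         if d < 15:
--             # Тогда нужен еще и атлас за ПРЕДЫДУЩИЙ месяц
--             num_month_atlas = (month-1 if month > 1 else 12)
--         else:
--             # Тогда нужен еще и атлас за СЛЕДУЮЩИЙ месяц
--             num_month_atlas = (month+1 if month < 12 else 1)
--
--         name_month_atlas = name_of_month(num_month_atlas)
--         dct_month_atlas[num_month_atlas] = name_month_atlas
--
--     return dct_month_atlas
-- ===== SOURCE B (Python) =====
-- def name_of_month(month: int) -> str: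
--     dct_month = {1: 'January', 2: 'February', 3: 'March', 4: 'April', 5: 'May', 6: 'June', 7: 'Jule', 8: 'August',
--                  9: 'September', 10: 'October', 11: 'November', 12: 'December'}
--     return dct_month[month]
--
-- def month_for_atlas_by_day(month: int, day: int) -> dict:
--     has_before = any(d < 15 for d in day)
--     has_after = any(d >= 15 for d in day)
--     result = {}
--     if has_before:
--         prev = month - 1 if month > 1 else 12
--         result[prev] = name_of_month(prev)
--     if has_after:
--         nxt = month + 1 if month < 12 else 1
--         result[nxt] = name_of_month(nxt)
--     return result
-- ===== Notes on version B (the rewrite author's own statement) =====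
-- stated objective: simpler
-- what changed: Replaces the per-element dict-reassignment loop by two any() scans (is there a day < 15, a day >= 15) and at most two dict insertions, previous month first; Pre_ excludes day lists mixing both kinds whose first element is >= 15, on which A's dict insertion order (next month before previous) is accidental, and inputs where name_of_month raises KeyError.
-- outside the precondition, e.g. on month_for_atlas_by_day(5, [20, 3]): A returns {6: 'June', 4: 'April'}, B returns {4: 'April', 6: 'June'}
import Mathlib
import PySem

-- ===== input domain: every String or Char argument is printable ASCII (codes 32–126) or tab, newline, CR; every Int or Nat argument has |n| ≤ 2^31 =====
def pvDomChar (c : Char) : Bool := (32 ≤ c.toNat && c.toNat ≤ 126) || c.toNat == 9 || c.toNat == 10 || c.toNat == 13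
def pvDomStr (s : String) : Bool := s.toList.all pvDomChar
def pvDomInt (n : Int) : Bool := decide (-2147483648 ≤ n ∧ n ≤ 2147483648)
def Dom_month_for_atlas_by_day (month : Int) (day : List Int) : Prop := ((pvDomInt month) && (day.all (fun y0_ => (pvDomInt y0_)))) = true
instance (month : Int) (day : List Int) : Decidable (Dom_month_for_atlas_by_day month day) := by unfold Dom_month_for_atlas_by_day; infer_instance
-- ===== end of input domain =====

-- B replaces A's per-element dict-reassignment loop by two any() scans and at most two
-- insertions, previous month first (objective: simpler).


-- ===== PORT A =====
-- name_of_month: dict literal indexed by the month number; none = KeyError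
def pvNameOfMonth (month : Int) : Option String :=
  PySem.Dict.get? (PySem.Dict.mk [((1:Int),"January"),(2,"February"),(3,"March"),(4,"April"),(5,"May"),(6,"June"),(7,"Jule"),(8,"August"),(9,"September"),(10,"October"),(11,"November"),(12,"December")]) month

-- one iteration of A's loop; none propagates a KeyError from name_of_month
def pvStepA (month : Int) (acc : Option (PySem.Dict Int String)) (d : Int) : Option (PySem.Dict Int String) :=
  match acc with
  | none => none
  | some dct =>
      let num : Int := if d < 15 then (if month > 1 then month - 1 else 12) else (if month < 12 then month + 1 else 1)
      match pvNameOfMonth num with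
      | none => none
      | some nm => some (dct.insert num nm)

def month_for_atlas_by_day (month : Int) (day : List Int) : List (Int × String) :=
  match day.foldl (pvStepA month) (some (PySem.Dict.mk [])) with
  | none => []   -- unreachable under Pre_ (A raises KeyError there)
  | some dct => dct.items

-- ===== PORT B =====
def month_for_atlas_by_day_alt (month : Int) (day : List Int) : List (Int × String) :=
  let hasBefore := day.any (fun d => decide (d < 15))
  let hasAfter := day.any (fun d => decide (15 ≤ d))
  let r0 : PySem.Dict Int String := PySem.Dict.mk []
  let r1 := if hasBefore then
      (let prev : Int := if month > 1 then month - 1 else 12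
       r0.insert prev ((pvNameOfMonth prev).getD ""))   -- getD "" unreachable under Pre_ (KeyError)
    else r0
  let r2 := if hasAfter then
      (let nxt : Int := if month < 12 then month + 1 else 1
       r1.insert nxt ((pvNameOfMonth nxt).getD ""))
    else r1
  r2.items

-- ===== PRECONDITION & SPEC =====
-- Pre_ excludes (a) inputs where name_of_month raises KeyError (a day < 15 with month > 13,
-- or a day >= 15 with month < 0), and (b) day lists containing both a day < 15 and a day >= 15
-- whose FIRST element is >= 15: there A's dict insertion order (next month before previous
-- month) is an accident of iteration order, while B always inserts the previous month first.
def Pre_month_for_atlas_by_day (month : Int) (day : List Int) : Prop :=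
  ((∃ d ∈ day, d < 15) → month ≤ 13) ∧ ((∃ d ∈ day, 15 ≤ d) → 0 ≤ month) ∧
  ((∃ d ∈ day, d < 15) → (day.head?.getD 15) < 15)
instance (month : Int) (day : List Int) : Decidable (Pre_month_for_atlas_by_day month day) := by unfold Pre_month_for_atlas_by_day; infer_instance

def pvWitness_month_for_atlas_by_day : Int × List Int := (5, [3, 20])

def Spec_month_for_atlas_by_day (month : Int) (day : List Int) (out : List (Int × String)) : Prop := out = month_for_atlas_by_day_alt month day
instance (month : Int) (day : List Int) (out : List (Int × String)) : Decidable (Spec_month_for_atlas_by_day month day out) := by unfold Spec_month_for_atlas_by_day; infer_instance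

-- ===== CLAIM (what is proved, stated in full; the proofs are below) =====
def Claim_equal_month_for_atlas_by_day : Prop := ∀ (month : Int) (day : List Int), Dom_month_for_atlas_by_day month day → Pre_month_for_atlas_by_day month day → Spec_month_for_atlas_by_day month day (month_for_atlas_by_day month day)

-- ===== LEMMAS AND PROOFS =====

theorem pvNameOfMonth_isSome (m : Int) (h1 : 1 ≤ m) (h2 : m ≤ 12) : (pvNameOfMonth m).isSome := by
  interval_cases m <;> decide

theorem pvFoldlFix {α β : Type} (f : Option β → α → Option β) (s : β) (l : List α)
    (h : ∀ d ∈ l, f (some s) d = some s) : l.foldl f (some s) = some s := by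
  induction l with
  | nil => rfl
  | cons d t ih =>
      simp only [List.foldl_cons]
      rw [h d (by simp)]
      exact ih (fun x hx => h x (List.mem_cons_of_mem _ hx))

-- the two candidate month numbers (proof-side abbreviations)
def pvP (month : Int) : Int := if month > 1 then month - 1 else 12
def pvN (month : Int) : Int := if month < 12 then month + 1 else 1

theorem pvPN_ne (month : Int) : pvP month ≠ pvN month := by
  unfold pvP pvN; split_ifs <;> omega

theorem pvStepA_eq (month : Int) (s : PySem.Dict Int String) (d : Int) :
    pvStepA month (some s) d =
      match pvNameOfMonth (if d < 15 then pvP month else pvN month) with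
      | none => none
      | some nm => some (s.insert (if d < 15 then pvP month else pvN month) nm) := rfl

theorem pvDictInsNew (k k' : Int) (v v' : String) (h : k ≠ k') :
    (PySem.Dict.mk [(k,v)]).insert k' v' = PySem.Dict.mk [(k,v),(k',v')] := by
  simp [PySem.Dict.insert, PySem.Dict.contains_mk]; exact h

theorem pvDictInsEmpty (k : Int) (v : String) :
    (PySem.Dict.mk ([] : List (Int × String))).insert k v = PySem.Dict.mk [(k,v)] := by
  simp [PySem.Dict.insert, PySem.Dict.contains_mk]

theorem pvDictInsSame (k : Int) (v : String) :
    (PySem.Dict.mk [(k,v)]).insert k v = PySem.Dict.mk [(k,v)] := by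
  simp [PySem.Dict.insert, PySem.Dict.contains_mk]

theorem pvDictInsFst (k k' : Int) (v v' : String) (h : k ≠ k') :
    (PySem.Dict.mk [(k,v),(k',v')]).insert k v = PySem.Dict.mk [(k,v),(k',v')] := by
  simp [PySem.Dict.insert, PySem.Dict.contains_mk, Ne.symm h]

theorem pvDictInsSnd (k k' : Int) (v v' : String) (h : k ≠ k') :
    (PySem.Dict.mk [(k,v),(k',v')]).insert k' v' = PySem.Dict.mk [(k,v),(k',v')] := by
  simp [PySem.Dict.insert, PySem.Dict.contains_mk, h]

theorem pvPvalid (month : Int) (h : month ≤ 13) : ∃ pn, pvNameOfMonth (pvP month) = some pn := by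
  refine Option.isSome_iff_exists.mp (pvNameOfMonth_isSome _ ?_ ?_) <;> (unfold pvP; split_ifs <;> omega)

theorem pvNvalid (month : Int) (h : 0 ≤ month) : ∃ nn, pvNameOfMonth (pvN month) = some nn := by
  refine Option.isSome_iff_exists.mp (pvNameOfMonth_isSome _ ?_ ?_) <;> (unfold pvN; split_ifs <;> omega)

-- once both keys are present with their names, A's loop leaves the dict unchanged
theorem pvFoldFull (month : Int) (pn nn : String)
    (hp : pvNameOfMonth (pvP month) = some pn) (hn : pvNameOfMonth (pvN month) = some nn)
    (s : PySem.Dict Int String)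
    (hs1 : s.insert (pvP month) pn = s) (hs2 : s.insert (pvN month) nn = s)
    (l : List Int) : l.foldl (pvStepA month) (some s) = some s := by
  refine pvFoldlFix _ _ _ (fun d _ => ?_)
  rw [pvStepA_eq]
  by_cases hd : d < 15 <;> simp [hd, hp, hn, hs1, hs2]

theorem pvFoldAllP (month : Int) (pn : String) (hp : pvNameOfMonth (pvP month) = some pn)
    (l : List Int) (hall : ∀ d ∈ l, d < 15) :
    l.foldl (pvStepA month) (some (PySem.Dict.mk [(pvP month, pn)])) = some (PySem.Dict.mk [(pvP month, pn)]) := by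
  refine pvFoldlFix _ _ _ (fun d hd => ?_)
  rw [pvStepA_eq]
  simp [hall d hd, hp, pvDictInsSame]

theorem pvFoldAllN (month : Int) (nn : String) (hn : pvNameOfMonth (pvN month) = some nn)
    (l : List Int) (hall : ∀ d ∈ l, ¬ d < 15) :
    l.foldl (pvStepA month) (some (PySem.Dict.mk [(pvN month, nn)])) = some (PySem.Dict.mk [(pvN month, nn)]) := by
  refine pvFoldlFix _ _ _ (fun d hd => ?_)
  rw [pvStepA_eq]
  simp [hall d hd, hn, pvDictInsSame]

-- after the previous month is inserted, the rest of A's loop adds the next month iff some day >= 15 remains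
theorem pvFoldMixP (month : Int) (pn nn : String)
    (hp : pvNameOfMonth (pvP month) = some pn) (hn : pvNameOfMonth (pvN month) = some nn)
    (l : List Int) :
    l.foldl (pvStepA month) (some (PySem.Dict.mk [(pvP month, pn)])) =
      some (if l.any (fun d => decide (15 ≤ d)) then PySem.Dict.mk [(pvP month, pn), (pvN month, nn)]
            else PySem.Dict.mk [(pvP month, pn)]) := by
  induction l with
  | nil => simp
  | cons d t ih =>
      by_cases hd : d < 15
      · have h15 : ¬ (15 ≤ d) := by omega
        simp only [List.foldl_cons, List.any_cons, h15, decide_false, Bool.false_or]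
        rw [pvStepA_eq]; simp only [hd, if_true, hp, pvDictInsSame]
        exact ih
      · simp only [List.foldl_cons, List.any_cons, (by omega : 15 ≤ d), decide_true, Bool.true_or, if_true]
        rw [pvStepA_eq]; simp only [hd, if_false, hn]
        rw [pvDictInsNew _ _ _ _ (pvPN_ne month)]
        exact pvFoldFull month pn nn hp hn _ (pvDictInsFst _ _ _ _ (pvPN_ne month)) (pvDictInsSnd _ _ _ _ (pvPN_ne month)) t

-- B's result, written through pvP/pvN
theorem pvAlt_eq (month : Int) (day : List Int) :
    month_for_atlas_by_day_alt month day =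
      (let r1 := if day.any (fun d => decide (d < 15)) then
          (PySem.Dict.mk ([] : List (Int × String))).insert (pvP month) ((pvNameOfMonth (pvP month)).getD "")
        else PySem.Dict.mk []
       let r2 := if day.any (fun d => decide (15 ≤ d)) then
          r1.insert (pvN month) ((pvNameOfMonth (pvN month)).getD "")
        else r1
       r2.items) := rfl

-- ===== VERDICT =====
theorem month_for_atlas_by_day_spec : Claim_equal_month_for_atlas_by_day := by
  intro month day _ hpre
  obtain ⟨hpreP, hpreN, hord⟩ := hpre
  unfold Spec_month_for_atlas_by_day
  rw [pvAlt_eq]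
  cases day with
  | nil => rfl
  | cons d0 t =>
      unfold month_for_atlas_by_day
      by_cases hd0 : d0 < 15
      · obtain ⟨pn, hp⟩ := pvPvalid month (hpreP ⟨d0, by simp, hd0⟩)
        have h15 : ¬ (15 ≤ d0) := by omega
        simp only [List.foldl_cons, List.any_cons, hd0, h15, decide_true, decide_false,
          Bool.true_or, Bool.false_or, if_true]
        rw [pvStepA_eq]; simp only [hd0, if_true, hp, pvDictInsEmpty]
        by_cases hA : ∃ d ∈ t, 15 ≤ d
        · obtain ⟨nn, hn⟩ := pvNvalid month (hpreN ⟨hA.choose, List.mem_cons_of_mem _ hA.choose_spec.1, hA.choose_spec.2⟩)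
          have hany : t.any (fun d => decide (15 ≤ d)) = true := by
            simp only [List.any_eq_true, decide_eq_true_eq]; exact hA
          rw [pvFoldMixP month pn nn hp hn t, hany]
          simp [hn, pvDictInsNew _ _ _ _ (pvPN_ne month)]
        · have hallP : ∀ d ∈ t, d < 15 := fun d hd => by
            by_contra h; exact hA ⟨d, hd, by omega⟩
          rw [pvFoldAllP month pn hp t hallP]
          have hnone : t.any (fun d => decide (15 ≤ d)) = false := by
            rw [Bool.eq_false_iff]; intro h
            simp only [List.any_eq_true, decide_eq_true_eq] at h; exact hA h
          simp [hnone]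
      · -- first day >= 15: by Pre_'s order condition no day is < 15
        have hall : ∀ d ∈ (d0 :: t), ¬ d < 15 := by
          intro d hd hdlt
          have := hord ⟨d, hd, hdlt⟩
          simp only [List.head?_cons, Option.getD_some] at this
          omega
        obtain ⟨nn, hn⟩ := pvNvalid month (hpreN ⟨d0, by simp, by omega⟩)
        have hnoneB : (d0 :: t).any (fun d => decide (d < 15)) = false := by
          rw [Bool.eq_false_iff]; intro h
          simp only [List.any_eq_true, decide_eq_true_eq] at h
          exact hall h.choose h.choose_spec.1 h.choose_spec.2
        simp only [List.foldl_cons, List.any_cons, hd0, (by omega : (15:Int) ≤ d0),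
          decide_true, decide_false, Bool.true_or, Bool.false_or, if_true]
        rw [pvStepA_eq]; simp only [hd0, if_false, hn, pvDictInsEmpty]
        rw [pvFoldAllN month nn hn t (fun d hd => hall d (List.mem_cons_of_mem _ hd))]
        have hnoneB' : t.any (fun d => decide (d < 15)) = false := by
          rw [Bool.eq_false_iff]; intro h
          simp only [List.any_eq_true, decide_eq_true_eq] at h
          exact hall h.choose (List.mem_cons_of_mem _ h.choose_spec.1) h.choose_spec.2
        simp [hnoneB', pvDictInsEmpty]
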